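-- pv_equiv track=rewrite | github.com/EraCat/hse_cbab2025_hw | src/python/contest_2.py | py_indent_are_correct
-- ===== SOURCE A (Python) =====
-- def py_indent_are_correct(lines_data):
--     if len(lines_data) == 0: return True
--     if lines_data[-1][0] == "compound": return False
--     if lines_data[0][1] != 0: return False
--
--     stack = [0]
--     prev_compound = False
--     for t, indent in lines_data:
--         top = stack[-1]
--
--         if prev_compound and indent <= top:
--             return False
--
--         if indent > top:
--             if not prev_compound:
--                 return False
--             stack.append(indent)
--         elif indent < top:
--             while stack and stack[-1] > indent:
--                 stack.pop()
--             if not stack or stack[-1] != indent: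
--                 return False
--
--         prev_compound = (t == "compound")
--
--     return True
-- ===== SOURCE B (Python) =====
-- def py_indent_are_correct(lines_data):
--     if not lines_data:
--         return True
--     if lines_data[-1][0] == "compound":
--         return False
--     if lines_data[0][1] != 0:
--         return False
--     n = len(lines_data)
--
--     def parse_block(i, lvl):
--         # consume consecutive lines of the block whose indent is exactly `lvl`,
--         # recursing into the child block that must follow each compound line;
--         # return the index of the first line after the block, or None on error
--         while i < n and lines_data[i][1] == lvl:
--             t = lines_data[i][0]
--             i += 1
--             if t == "compound":
--                 if i >= n or lines_data[i][1] <= lvl: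
--                     return None
--                 i = parse_block(i, lines_data[i][1])
--                 if i is None:
--                     return None
--         if i < n and lines_data[i][1] > lvl:
--             return None  # indent increased without a preceding compound line
--         return i
--
--     return parse_block(0, 0) == n
-- ===== Notes on version B (the rewrite author's own statement) =====
-- stated objective: alternative
-- what changed: Replaces A's single loop over an explicit indent stack (with while-loop popping and a prev_compound flag) by a recursive-descent parser: a helper consumes the lines of one block at a fixed indent level and recurses into the strictly deeper block that must follow each compound line, validity being 'the top-level block parse consumes every line'.
import Mathlib
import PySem

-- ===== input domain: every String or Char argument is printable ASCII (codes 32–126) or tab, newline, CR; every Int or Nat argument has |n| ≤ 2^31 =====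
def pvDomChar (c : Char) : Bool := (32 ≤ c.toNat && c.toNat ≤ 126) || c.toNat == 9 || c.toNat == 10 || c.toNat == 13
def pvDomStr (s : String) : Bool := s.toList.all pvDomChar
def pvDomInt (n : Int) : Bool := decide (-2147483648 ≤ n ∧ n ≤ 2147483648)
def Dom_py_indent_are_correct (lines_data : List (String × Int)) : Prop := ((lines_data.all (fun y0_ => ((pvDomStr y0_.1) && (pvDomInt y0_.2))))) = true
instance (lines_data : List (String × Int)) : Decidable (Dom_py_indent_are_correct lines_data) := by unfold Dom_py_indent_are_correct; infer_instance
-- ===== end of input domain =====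

-- B replaces A's explicit indent stack by a recursive-descent parser over nested blocks (alternative decomposition, same cost).


-- ===== PORT A =====
-- the `while stack and stack[-1] > indent: stack.pop()` loop (head of the list = python's stack top)
def popTo (indent : Int) : List Int → List Int
  | [] => []
  | s :: rest => if indent < s then popTo indent rest else s :: rest

-- A's `for t, indent in lines_data` loop; stack head = python's stack[-1] (nonempty whenever reached)
def aLoop : List (String × Int) → List Int → Bool → Bool
  | [], _, _ => true
  | (t, indent) :: rest, stack, prev =>
    let top := stack.headD 0
    if prev ∧ indent ≤ top then false
    else if top < indent then
      if prev = false then false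
      else aLoop rest (indent :: stack) (t == "compound")
    else if indent < top then
      match popTo indent stack with
      | [] => false
      | x :: xs => if x ≠ indent then false else aLoop rest (x :: xs) (t == "compound")
    else aLoop rest stack (t == "compound")

def py_indent_are_correct (lines_data : List (String × Int)) : Bool :=
  match lines_data with
  | [] => true
  | (_, i0) :: _ =>
    if (((lines_data.getLast?).map Prod.fst).getD "") == "compound" then false
    else if i0 ≠ 0 then false
    else aLoop lines_data [0] false

-- ===== PORT B =====
-- Source B's parse_block: consumes the block at indent `lvl`, returns the remaining suffix
-- (the subtype length bound only justifies termination of the nested call)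
def parseB : (l : List (String × Int)) → Int → Option { r : List (String × Int) // r.length ≤ l.length }
  | [], _ => some ⟨[], Nat.le_refl 0⟩
  | (t, ind) :: rest, lvl =>
    if ind = lvl then
      if t = "compound" then
        match rest with
        | [] => none
        | (t2, ind2) :: rest2 =>
          if ind2 ≤ lvl then none
          else
            match parseB ((t2, ind2) :: rest2) ind2 with
            | none => none
            | some ⟨rem, hrem⟩ =>
              match parseB rem lvl with
              | none => none
              | some ⟨r, hr⟩ => some ⟨r, by simp only [List.length_cons] at hrem hr ⊢; omega⟩
      else
        match parseB rest lvl with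
        | none => none
        | some ⟨r, hr⟩ => some ⟨r, by simp only [List.length_cons]; omega⟩
    else if lvl < ind then none
    else some ⟨(t, ind) :: rest, Nat.le_refl _⟩
termination_by l _ => l.length
decreasing_by
  · simp only [List.length_cons]; omega
  · simp only [List.length_cons] at hrem ⊢; omega
  · simp only [List.length_cons]; omega

def py_indent_are_correct_alt (lines_data : List (String × Int)) : Bool :=
  match lines_data with
  | [] => true
  | (_, i0) :: _ =>
    if (((lines_data.getLast?).map Prod.fst).getD "") == "compound" then false
    else if i0 ≠ 0 then false
    else match parseB lines_data 0 with
      | none => false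
      | some ⟨rem, _⟩ => rem.isEmpty

-- ===== PRECONDITION & SPEC =====
def Spec_py_indent_are_correct (lines_data : List (String × Int)) (out : Bool) : Prop := out = py_indent_are_correct_alt lines_data
instance (lines_data : List (String × Int)) (out : Bool) : Decidable (Spec_py_indent_are_correct lines_data out) := by unfold Spec_py_indent_are_correct; infer_instance

-- ===== CLAIM (what is proved, stated in full; the proofs are below) =====
def Claim_equal_py_indent_are_correct : Prop := ∀ (lines_data : List (String × Int)), Dom_py_indent_are_correct lines_data → Spec_py_indent_are_correct lines_data (py_indent_are_correct lines_data)

-- ===== LEMMAS AND PROOFS =====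
-- parseB with the length bound stripped
def pB (l : List (String × Int)) (lvl : Int) : Option (List (String × Int)) :=
  (parseB l lvl).map Subtype.val

-- chain of parse_block calls over the stack of open indent levels (head = innermost)
def chainB : List (String × Int) → List Int → Bool
  | l, [] => l.isEmpty
  | l, lvl :: S =>
    match pB l lvl with
    | none => false
    | some rem => chainB rem S

lemma chainB_cons (l : List (String × Int)) (lvl : Int) (S : List Int) :
    chainB l (lvl :: S) = match pB l lvl with
      | none => false
      | some rem => chainB rem S := rfl

lemma pB_nil (lvl : Int) : pB [] lvl = some [] := by
  rw [pB, parseB.eq_def]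
  rfl

lemma pB_hi {ind lvl : Int} (h : lvl < ind) (t : String) (rest : List (String × Int)) :
    pB ((t, ind) :: rest) lvl = none := by
  rw [pB, parseB.eq_def]
  dsimp only
  rw [if_neg (by omega : ¬ ind = lvl), if_pos h]
  rfl

lemma pB_lo {ind lvl : Int} (h : ind < lvl) (t : String) (rest : List (String × Int)) :
    pB ((t, ind) :: rest) lvl = some ((t, ind) :: rest) := by
  rw [pB, parseB.eq_def]
  dsimp only
  rw [if_neg (by omega : ¬ ind = lvl), if_neg (by omega : ¬ lvl < ind)]
  rfl

lemma pB_eq_simple {t : String} (ht : ¬ t = "compound") (lvl : Int) (rest : List (String × Int)) :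
    pB ((t, lvl) :: rest) lvl = pB rest lvl := by
  rw [pB, parseB.eq_def]
  simp only [if_neg ht]
  cases hp : parseB rest lvl with
  | none => simp [pB, hp]
  | some r => obtain ⟨rv, hrv⟩ := r; simp [pB, hp]

lemma pB_cmp_le {t : String} (ht : t = "compound") {lvl ind2 : Int} (h2 : ind2 ≤ lvl)
    (t2 : String) (rest2 : List (String × Int)) :
    pB ((t, lvl) :: (t2, ind2) :: rest2) lvl = none := by
  rw [pB, parseB.eq_def]; simp [ht, h2]

lemma pB_cmp_gt {t : String} (ht : t = "compound") {lvl ind2 : Int} (h2 : lvl < ind2)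
    (t2 : String) (rest2 : List (String × Int)) :
    pB ((t, lvl) :: (t2, ind2) :: rest2) lvl
      = (pB ((t2, ind2) :: rest2) ind2).bind (fun rem => pB rem lvl) := by
  rw [pB, parseB.eq_def]
  simp only [ht, if_neg (by omega : ¬ ind2 ≤ lvl)]
  cases hp : parseB ((t2, ind2) :: rest2) ind2 with
  | none => simp [pB, hp]
  | some rm =>
    obtain ⟨rem, hrem⟩ := rm
    cases hq : parseB rem lvl with
    | none => simp [pB, hp, hq]
    | some r => obtain ⟨rv, hrv⟩ := r; simp [pB, hp, hq]

lemma chainB_nil_l : ∀ S : List Int, chainB [] S = true := by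
  intro S
  induction S with
  | nil => rfl
  | cons lvl S ih => rw [chainB_cons, pB_nil]; exact ih

lemma le_or_lt' (a b : Int) : a ≤ b ∨ b < a := by omega

lemma hlast_tail (a : String × Int) (l : List (String × Int))
    (h : ∀ p : String × Int, (a :: l).getLast? = some p → ¬ p.1 = "compound") :
    ∀ p : String × Int, l.getLast? = some p → ¬ p.1 = "compound" := by
  intro p hp
  cases l with
  | nil => simp at hp
  | cons b l' => exact h p (by rw [List.getLast?_cons_cons]; exact hp)

-- one dedent step: the popped level behaves like a fresh stack top
lemma pop_step (t : String) (ind top s₁ : Int) (rest : List (String × Int)) (S'' : List Int)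
    (h : ind < top) :
    aLoop ((t, ind) :: rest) (top :: s₁ :: S'') false
      = aLoop ((t, ind) :: rest) (s₁ :: S'') false := by
  have hnt : ¬ top < ind := by omega
  rcases lt_trichotomy s₁ ind with h1 | h1 | h1
  · simp [aLoop, popTo, h, h1, hnt]
    rw [if_neg (by omega : ¬ ind < s₁)]
    simp [show s₁ ≠ ind by omega]
  · subst h1
    simp [aLoop, popTo, h, hnt]
    try exact fun _ => le_of_lt h
  · simp [aLoop, popTo, h, h1, hnt]
    try exact fun _ => by omega

-- main invariant: A's loop (with prev_compound = False) over a strictly decreasing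
-- stack of open levels equals the chain of B's parse_block calls over those levels
lemma aLoop_eq_chainB (l : List (String × Int)) (S : List Int)
    (hS : S ≠ [])
    (hlast : ∀ p : String × Int, l.getLast? = some p → ¬ p.1 = "compound") :
    aLoop l S false = chainB l S := by
  match l, S with
  | [], S => rw [chainB_nil_l]; rfl
  | (t, ind) :: rest, top :: S' =>
    rcases lt_trichotomy ind top with hlt | heq | hgt
    · -- dedent
      cases S' with
      | nil =>
        have h1 : aLoop ((t, ind) :: rest) [top] false = false := by
          simp [aLoop, hlt, popTo]
        rw [h1, chainB_cons, pB_lo hlt]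
        rfl
      | cons s₁ S'' =>
        rw [pop_step t ind top s₁ rest S'' hlt,
          aLoop_eq_chainB ((t, ind) :: rest) (s₁ :: S'') (by simp) hlast,
          show chainB ((t, ind) :: rest) (top :: s₁ :: S'') = chainB ((t, ind) :: rest) (s₁ :: S'')
            from by rw [chainB_cons, pB_lo hlt]]
    · -- same level
      subst heq
      by_cases ht : t = "compound"
      · match rest, hlast with
        | [], hlast =>
          exact absurd ht (hlast (t, ind) (by simp))
        | (t2, ind2) :: rest2, hlast =>
          have hlast' := hlast_tail (t, ind) ((t2, ind2) :: rest2) hlast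
          rcases le_or_lt' ind2 ind with h2 | h2
          · have hA : aLoop ((t, ind) :: (t2, ind2) :: rest2) (ind :: S') false = false := by
              simp [aLoop, ht, h2]
            rw [hA, chainB_cons, pB_cmp_le ht h2]
          · have hA : aLoop ((t, ind) :: (t2, ind2) :: rest2) (ind :: S') false
                = aLoop ((t2, ind2) :: rest2) (ind2 :: ind :: S') false := by
              simp [aLoop, ht, h2]
            rw [hA, aLoop_eq_chainB ((t2, ind2) :: rest2) (ind2 :: ind :: S') (by simp) hlast',
              chainB_cons, chainB_cons, pB_cmp_gt ht h2]
            cases hpb : pB ((t2, ind2) :: rest2) ind2 with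
            | none => simp
            | some rem => simp [chainB_cons]
      · have hbe : (t == "compound") = false := by simp [ht]
        have hA : aLoop ((t, ind) :: rest) (ind :: S') false
            = aLoop rest (ind :: S') false := by
          simp [aLoop, hbe]
        rw [hA, aLoop_eq_chainB rest (ind :: S') (by simp) (hlast_tail (t, ind) rest hlast),
          chainB_cons, chainB_cons, pB_eq_simple ht]
    · -- indent increased without compound
      have hA : aLoop ((t, ind) :: rest) (top :: S') false = false := by
        simp [aLoop, hgt]
      rw [hA, chainB_cons, pB_hi hgt]
termination_by (l.length, S.length)

-- ===== VERDICT (by name: the statement is the Claim_ definition above) =====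
theorem py_indent_are_correct_spec : Claim_equal_py_indent_are_correct := by
  unfold Claim_equal_py_indent_are_correct
  intro l _
  unfold Spec_py_indent_are_correct
  match l with
  | [] => rfl
  | (t0, i0) :: rest =>
    unfold py_indent_are_correct py_indent_are_correct_alt
    by_cases hlastc : ((((t0, i0) :: rest).getLast?).map Prod.fst).getD "" = "compound"
    · simp [hlastc]
    · simp only [beq_iff_eq, hlastc, if_false]
      by_cases hi0 : i0 = 0
      · subst hi0
        rw [if_neg (by omega : ¬ ((0:Int) ≠ 0))]
        have hlast : ∀ p : String × Int, ((t0, (0:Int)) :: rest).getLast? = some p → ¬ p.1 = "compound" := by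
          intro p hp hc
          exact hlastc (by rw [hp]; simpa using hc)
        rw [aLoop_eq_chainB ((t0, (0:Int)) :: rest) [0] (by simp) hlast, chainB_cons]
        cases hp : parseB ((t0, (0:Int)) :: rest) 0 with
        | none => simp [pB, hp]
        | some r => obtain ⟨rem, hr⟩ := r; simp [pB, hp, chainB]
      · simp [hi0]
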